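-- pv_equiv track=rewrite | github.com/Martin187187/NextStationLondonSolver | graph.py | build_8_neighbor_edges
-- ===== SOURCE A (Python) =====
-- Point = tuple[int, int]
--
-- def build_8_neighbor_edges(points: set[Point]) -> set[tuple[Point, Point]]:
-- 	offsets = [
-- 		(-1, -1),
-- 		(-1, 0),
-- 		(-1, 1),
-- 		(0, -1),
-- 		(0, 1),
-- 		(1, -1),
-- 		(1, 0),
-- 		(1, 1),
-- 	]
--
-- 	# Connect along each of the 8 directions even with gaps, e.g. (1,0) -> (3,0)
-- 	# when (2,0) is missing. For each direction we connect to the nearest visible node.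
-- 	if not points:
-- 		return set()
--
-- 	xs = [x for x, _ in points]
-- 	ys = [y for _, y in points]
-- 	max_step = max(max(xs) - min(xs), max(ys) - min(ys)) + 2
--
-- 	edges: set[tuple[Point, Point]] = set()
-- 	for x, y in points:
-- 		for dx, dy in offsets:
-- 			for step in range(1, max_step + 1):
-- 				candidate = (x + dx * step, y + dy * step)
-- 				if candidate in points:
-- 					a = (x, y)
-- 					b = candidate
-- 					edges.add((a, b) if a <= b else (b, a))
-- 					break
-- 	return edges
-- ===== SOURCE B (Python) =====
-- Point = tuple[int, int]
--
-- def _ray_step(dx, dy, ex, ey):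
-- 	# step s >= 1 with (ex, ey) == (s*dx, s*dy), else None
-- 	if dx == 0:
-- 		if ex != 0 or ey * dy <= 0:
-- 			return None
-- 		return ey * dy
-- 	if dy == 0:
-- 		if ey != 0 or ex * dx <= 0:
-- 			return None
-- 		return ex * dx
-- 	if ex * dx != ey * dy or ex * dx <= 0:
-- 		return None
-- 	return ex * dx
--
-- def build_8_neighbor_edges(points: set[Point]) -> set[tuple[Point, Point]]:
-- 	offsets = [
-- 		(-1, -1),
-- 		(-1, 0),
-- 		(-1, 1),
-- 		(0, -1),
-- 		(0, 1),
-- 		(1, -1),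
-- 		(1, 0),
-- 		(1, 1),
-- 	]
-- 	# One pass over the points per (point, direction): keep the on-ray point
-- 	# with the smallest step, instead of scanning coordinate steps outward.
-- 	edges: set[tuple[Point, Point]] = set()
-- 	for x, y in points:
-- 		for dx, dy in offsets:
-- 			best = None
-- 			for qx, qy in points:
-- 				s = _ray_step(dx, dy, qx - x, qy - y)
-- 				if s is not None and (best is None or s < best[0]):
-- 					best = (s, (qx, qy))
-- 			if best is not None:
-- 				a, b = (x, y), best[1]
-- 				edges.add((a, b) if a <= b else (b, a))
-- 	return edges
-- ===== Notes on version B (the rewrite author's own statement) =====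
-- stated objective: alternative
-- what changed: A scans outward step by step along each of the 8 directions until it hits a point (inner loop over coordinate steps, bounded by the coordinate range); B instead makes one pass over the points per (point, direction), keeping the on-ray point with the smallest step.
import Mathlib
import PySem

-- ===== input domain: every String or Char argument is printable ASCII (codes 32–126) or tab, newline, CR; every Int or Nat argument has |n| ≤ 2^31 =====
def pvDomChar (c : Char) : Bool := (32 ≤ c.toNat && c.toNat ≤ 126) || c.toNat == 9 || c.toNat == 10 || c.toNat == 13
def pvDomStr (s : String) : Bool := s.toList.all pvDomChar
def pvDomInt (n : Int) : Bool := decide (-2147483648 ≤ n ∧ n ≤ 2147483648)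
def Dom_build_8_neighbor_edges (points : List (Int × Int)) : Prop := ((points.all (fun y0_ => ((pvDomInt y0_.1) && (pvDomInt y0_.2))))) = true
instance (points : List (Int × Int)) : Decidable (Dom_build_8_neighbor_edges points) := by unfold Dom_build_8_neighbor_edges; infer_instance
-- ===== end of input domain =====

-- B replaces A's per-(point,direction) outward scan over coordinate steps by a single pass over
-- the points keeping the on-ray point of smallest step (objective: alternative — a different
-- traversal whose inner loop runs over the points instead of the coordinate steps).
-- Both Pythons iterate over an input set and return a set; the result is order-independent as a
-- set, and the ports take/return the distinct elements as lists.

-- shared literal: the 8 directions (identical list literal in both Python sources)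
def pvOffsets : List (Int × Int) := [(-1, -1), (-1, 0), (-1, 1), (0, -1), (0, 1), (1, -1), (1, 0), (1, 1)]

-- shared: Python tuple comparison '(a, b) if a <= b else (b, a)' (lexicographic <=), identical in both sources
def pvLePair (a b : Int × Int) : Bool := decide (a.1 < b.1) || (decide (a.1 = b.1) && decide (a.2 ≤ b.2))

def pvNormEdge (a b : Int × Int) : (Int × Int) × (Int × Int) := if pvLePair a b then (a, b) else (b, a)

-- ===== PORT A =====
-- max_step = max(max(xs)-min(xs), max(ys)-min(ys)) + 2 (only evaluated when points ≠ [])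
def pvMaxStep (points : List (Int × Int)) : Int :=
  max ((PySem.List.max? (points.map (fun p => p.1)) (fun v => v)).getD 0
        - (PySem.List.min? (points.map (fun p => p.1)) (fun v => v)).getD 0)
      ((PySem.List.max? (points.map (fun p => p.2)) (fun v => v)).getD 0
        - (PySem.List.min? (points.map (fun p => p.2)) (fun v => v)).getD 0) + 2

-- inner 'for step in range(1, max_step+1): … break' = first step whose candidate is in points
def pvScanA (points : List (Int × Int)) (m : Int) (p d : Int × Int) : Option Int :=
  (PySem.List.pyRange 1 (m + 1) 1).find? (fun s => points.contains (p.1 + d.1 * s, p.2 + d.2 * s))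

def build_8_neighbor_edges (points : List (Int × Int)) : List ((Int × Int) × (Int × Int)) :=
  if points = [] then PySem.Set.empty
  else
    let max_step := pvMaxStep points
    points.foldl (fun edges p =>
      pvOffsets.foldl (fun edges d =>
        match pvScanA points max_step p d with
        | some s => PySem.Set.add edges (pvNormEdge p (p.1 + d.1 * s, p.2 + d.2 * s))
        | none => edges) edges) PySem.Set.empty

-- ===== PORT B =====
-- _ray_step(dx, dy, ex, ey): the step s >= 1 with (ex, ey) == (s*dx, s*dy), else None
def rayStep (dx dy ex ey : Int) : Option Int :=
  if dx = 0 then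
    if ex ≠ 0 ∨ ey * dy ≤ 0 then none else some (ey * dy)
  else if dy = 0 then
    if ey ≠ 0 ∨ ex * dx ≤ 0 then none else some (ex * dx)
  else if ex * dx ≠ ey * dy ∨ ex * dx ≤ 0 then none else some (ex * dx)

-- the body of B's inner loop: keep the on-ray point with the smallest step so far
def pvBStep (p d : Int × Int) (best : Option (Int × (Int × Int))) (q : Int × Int) :
    Option (Int × (Int × Int)) :=
  match rayStep d.1 d.2 (q.1 - p.1) (q.2 - p.2) with
  | none => best
  | some s =>
    match best with
    | none => some (s, q)
    | some b => if s < b.1 then some (s, q) else best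

-- inner 'for qx, qy in points: …' of B
def pvBestB (points : List (Int × Int)) (p d : Int × Int) : Option (Int × (Int × Int)) :=
  points.foldl (pvBStep p d) none

def build_8_neighbor_edges_alt (points : List (Int × Int)) : List ((Int × Int) × (Int × Int)) :=
  points.foldl (fun edges p =>
    pvOffsets.foldl (fun edges d =>
      match pvBestB points p d with
      | some b => PySem.Set.add edges (pvNormEdge p b.2)
      | none => edges) edges) PySem.Set.empty

-- ===== PRECONDITION & SPEC =====
def Spec_build_8_neighbor_edges (points : List (Int × Int)) (out : List ((Int × Int) × (Int × Int))) : Prop := out = build_8_neighbor_edges_alt points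
instance (points : List (Int × Int)) (out : List ((Int × Int) × (Int × Int))) : Decidable (Spec_build_8_neighbor_edges points out) := by unfold Spec_build_8_neighbor_edges; infer_instance

-- ===== CLAIM (what is proved, stated in full; the proofs are below) =====
def Claim_equal_build_8_neighbor_edges : Prop := ∀ (points : List (Int × Int)), Dom_build_8_neighbor_edges points → Spec_build_8_neighbor_edges points (build_8_neighbor_edges points)

-- ===== LEMMAS AND PROOFS =====

-- rayStep characterised: for each of the 8 directions it is exactly the positive step along d
lemma rayStep_some_iff (d : Int × Int) (hd : d ∈ pvOffsets) (ex ey s : Int) :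
    rayStep d.1 d.2 ex ey = some s ↔ 1 ≤ s ∧ ex = s * d.1 ∧ ey = s * d.2 := by
  fin_cases hd <;> simp only [rayStep] <;> norm_num <;> constructor <;> intro h <;> omega

-- the B-side fold: provenance, monotonicity and dominance, proved together
lemma bfold_spec (p d : Int × Int) (L : List (Int × Int)) :
    ∀ (acc : Option (Int × (Int × Int))),
      (L.foldl (pvBStep p d) acc = acc
        ∨ ∃ q ∈ L, ∃ s, rayStep d.1 d.2 (q.1 - p.1) (q.2 - p.2) = some s ∧
            L.foldl (pvBStep p d) acc = some (s, q))
      ∧ (∀ b, acc = some b → ∃ b', L.foldl (pvBStep p d) acc = some b' ∧ b'.1 ≤ b.1)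
      ∧ (∀ q ∈ L, ∀ s, rayStep d.1 d.2 (q.1 - p.1) (q.2 - p.2) = some s →
          ∃ b', L.foldl (pvBStep p d) acc = some b' ∧ b'.1 ≤ s) := by
  induction L with
  | nil => intro acc; refine ⟨Or.inl rfl, fun b hb => ⟨b, by simp [hb]⟩, by simp⟩
  | cons q0 t ih =>
    intro acc
    simp only [List.foldl_cons]
    obtain ⟨ihp, ihm, ihd⟩ := ih (pvBStep p d acc q0)
    refine ⟨?_, ?_, ?_⟩
    · -- provenance
      rcases ihp with h | ⟨q, hq, s, hs, hr⟩
      · rw [h]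
        cases hr0 : rayStep d.1 d.2 (q0.1 - p.1) (q0.2 - p.2) with
        | none => left; simp [pvBStep, hr0]
        | some s0 =>
          cases acc with
          | none => exact Or.inr ⟨q0, by simp, s0, hr0, by simp [pvBStep, hr0]⟩
          | some b =>
            by_cases hlt : s0 < b.1
            · exact Or.inr ⟨q0, by simp, s0, hr0, by simp [pvBStep, hr0, hlt]⟩
            · left; simp [pvBStep, hr0, hlt]
      · exact Or.inr ⟨q, by simp [hq], s, hs, hr⟩
    · -- monotone
      intro b hb
      subst hb
      have hstep : ∃ c, pvBStep p d (some b) q0 = some c ∧ c.1 ≤ b.1 := by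
        cases hr0 : rayStep d.1 d.2 (q0.1 - p.1) (q0.2 - p.2) with
        | none => exact ⟨b, by simp [pvBStep, hr0], le_refl _⟩
        | some s0 =>
          by_cases hlt : s0 < b.1
          · exact ⟨(s0, q0), by simp [pvBStep, hr0, hlt], le_of_lt hlt⟩
          · exact ⟨b, by simp [pvBStep, hr0, hlt], le_refl _⟩
      obtain ⟨c, hc, hcb⟩ := hstep
      rw [hc] at ihm ⊢
      obtain ⟨b', hb', hle⟩ := ihm c rfl
      exact ⟨b', hb', le_trans hle hcb⟩
    · -- dominance
      intro q hq s hs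
      rcases List.mem_cons.mp hq with rfl | hqt
      · have hstep : ∃ c, pvBStep p d acc q = some c ∧ c.1 ≤ s := by
          cases acc with
          | none => exact ⟨(s, q), by simp [pvBStep, hs], le_refl _⟩
          | some b =>
            by_cases hlt : s < b.1
            · exact ⟨(s, q), by simp [pvBStep, hs, hlt], le_refl _⟩
            · exact ⟨b, by simp [pvBStep, hs, hlt], by omega⟩
        obtain ⟨c, hc, hcs⟩ := hstep
        rw [hc] at ihm ⊢
        obtain ⟨b', hb', hle⟩ := ihm c rfl
        exact ⟨b', hb', le_trans hle hcs⟩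
      · exact ihd q hqt s hs

-- find? on range(a, b) returns the minimal element satisfying the predicate
lemma find?_pyRange_min (pred : Int → Bool) (a b s0 : Int) (ha : a ≤ s0) (hb : s0 < b)
    (hs : pred s0 = true) (hmin : ∀ t, a ≤ t → t < s0 → pred t = false) :
    (PySem.List.pyRange a b 1).find? pred = some s0 := by
  induction hn : (b - a).toNat generalizing a with
  | zero => omega
  | succ n ih =>
    have hab : a < b := by omega
    rw [PySem.List.pyRange_one_cons hab, List.find?_cons]
    by_cases hsa : a = s0
    · subst hsa; rw [hs]
    · rw [hmin a le_rfl (by omega)]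
      exact ih (a + 1) (by omega) (fun t ht1 ht2 => hmin t (by omega) ht2) (by omega)

-- bounds for elements of a nonempty list of ints via max?/min?
lemma bounds_of_mem (l : List Int) (x : Int) (hx : x ∈ l) :
    (PySem.List.min? l (fun v => v)).getD 0 ≤ x ∧ x ≤ (PySem.List.max? l (fun v => v)).getD 0 := by
  have hne : l ≠ [] := by rintro rfl; simp at hx
  obtain ⟨mx, hmx⟩ : ∃ mx, PySem.List.max? l (fun v => v) = some mx := by
    cases h : PySem.List.max? l (fun v => v) with
    | none => exact absurd ((PySem.List.max?_eq_none_iff l _).mp h) hne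
    | some m => exact ⟨m, rfl⟩
  obtain ⟨mn, hmn⟩ : ∃ mn, PySem.List.min? l (fun v => v) = some mn := by
    cases h : PySem.List.min? l (fun v => v) with
    | none => exact absurd ((PySem.List.min?_eq_none_iff l _).mp h) hne
    | some m => exact ⟨m, rfl⟩
  rw [hmx, hmn]
  exact ⟨PySem.List.min?_isMin hmn x hx, PySem.List.max?_isMax hmx x hx⟩

-- any on-ray step between two members of the list is at most pvMaxStep
lemma step_le_maxStep (points : List (Int × Int)) (p q d : Int × Int)
    (hp : p ∈ points) (hq : q ∈ points) (hd : d ∈ pvOffsets) (s : Int)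
    (hs : rayStep d.1 d.2 (q.1 - p.1) (q.2 - p.2) = some s) : s ≤ pvMaxStep points := by
  rw [rayStep_some_iff d hd] at hs
  obtain ⟨h1, hx, hy⟩ := hs
  have hpx := bounds_of_mem (points.map (fun p => p.1)) p.1 (List.mem_map_of_mem hp)
  have hqx := bounds_of_mem (points.map (fun p => p.1)) q.1 (List.mem_map_of_mem hq)
  have hpy := bounds_of_mem (points.map (fun p => p.2)) p.2 (List.mem_map_of_mem hp)
  have hqy := bounds_of_mem (points.map (fun p => p.2)) q.2 (List.mem_map_of_mem hq)
  unfold pvMaxStep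
  fin_cases hd <;> simp only at hx hy <;> omega

-- the heart: A's outward scan and B's one-pass minimum name the same candidate point
lemma scan_eq_best (points : List (Int × Int)) (p d : Int × Int)
    (hp : p ∈ points) (hd : d ∈ pvOffsets) :
    (pvScanA points (pvMaxStep points) p d).map (fun s => (p.1 + d.1 * s, p.2 + d.2 * s))
      = (pvBestB points p d).map (fun b => b.2) := by
  obtain ⟨hprov, -, hdom⟩ := bfold_spec p d points none
  unfold pvBestB
  cases hB : points.foldl (pvBStep p d) none with
  | none =>
    have hnone : pvScanA points (pvMaxStep points) p d = none := by
      unfold pvScanA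
      rw [List.find?_eq_none]
      intro t ht
      rw [PySem.List.mem_pyRange_one] at ht
      simp only [Bool.not_eq_true]
      by_contra hc
      rw [Bool.not_eq_false, List.contains_iff_mem] at hc
      have hray : rayStep d.1 d.2 ((p.1 + d.1 * t) - p.1) ((p.2 + d.2 * t) - p.2) = some t := by
        rw [rayStep_some_iff d hd]
        refine ⟨ht.1, by ring, by ring⟩
      obtain ⟨b', hb', -⟩ := hdom _ hc t hray
      rw [hB] at hb'; simp at hb'
    rw [hnone]; rfl
  | some b =>
    rcases hprov with h | ⟨q, hq, s, hs, hr⟩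
    · rw [hB] at h; simp at h
    · rw [hB] at hr
      obtain rfl : b = (s, q) := by injection hr
      have hiff := (rayStep_some_iff d hd _ _ s).mp hs
      obtain ⟨h1, hx, hy⟩ := hiff
      have hqeq : q = (p.1 + d.1 * s, p.2 + d.2 * s) := by
        have e1 : q.1 = p.1 + d.1 * s := by rw [mul_comm d.1 s]; omega
        have e2 : q.2 = p.2 + d.2 * s := by rw [mul_comm d.2 s]; omega
        rw [Prod.ext_iff]; exact ⟨e1, e2⟩
      have hbound : s ≤ pvMaxStep points := step_le_maxStep points p q d hp hq hd s hs
      have hfind : pvScanA points (pvMaxStep points) p d = some s := by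
        unfold pvScanA
        apply find?_pyRange_min _ 1 (pvMaxStep points + 1) s h1 (by omega)
        · rw [List.contains_iff_mem, ← hqeq]; exact hq
        · intro t ht1 ht2
          by_contra hc
          rw [Bool.not_eq_false, List.contains_iff_mem] at hc
          have hray : rayStep d.1 d.2 ((p.1 + d.1 * t) - p.1) ((p.2 + d.2 * t) - p.2) = some t := by
            rw [rayStep_some_iff d hd]
            refine ⟨ht1, by ring, by ring⟩
          obtain ⟨b', hb', hle⟩ := hdom _ hc t hray
          rw [hB] at hb'
          obtain rfl : b' = (s, q) := by injection hb' with h'; exact h'.symm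
          simp at hle; omega
      rw [hfind]; simp [hqeq]

-- ===== VERDICT (by name: the statement is the Claim_ definition above) =====
theorem build_8_neighbor_edges_spec : Claim_equal_build_8_neighbor_edges := by
  intro points _
  unfold Spec_build_8_neighbor_edges build_8_neighbor_edges build_8_neighbor_edges_alt
  by_cases hne : points = []
  · subst hne; rfl
  · simp only [if_neg hne]
    refine PySem.List.foldl_congr_mem _ _ _ _ (fun acc p hp => ?_)
    refine PySem.List.foldl_congr_mem _ _ _ _ (fun acc2 d hd => ?_)
    have h := scan_eq_best points p d hp hd
    cases hB : pvBestB points p d with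
    | none => rw [hB] at h; simp only [Option.map_none] at h
              rw [Option.map_eq_none_iff] at h; rw [h]
    | some b =>
        rw [hB] at h; simp only [Option.map_some] at h
        rw [Option.map_eq_some_iff] at h
        obtain ⟨s, hsA, hcand⟩ := h
        rw [hsA]
        show PySem.Set.add acc2 (pvNormEdge p (p.1 + d.1 * s, p.2 + d.2 * s))
              = PySem.Set.add acc2 (pvNormEdge p b.2)
        rw [hcand]
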